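-- pv_equiv track=rewrite | github.com/philharmoniedeparis/ScoreBot | utils/write_entities.py | preprocess_entity
-- ===== SOURCE A (Python) =====
-- import string
--
-- def preprocess_entity(entity: str, lower=True):
--     # Lower
--     if lower:
--         entity = entity.lower()
--     # Strip punctuation
--     exclude = string.punctuation.replace("-", "")
--     exclude = exclude.replace("'", "")
--     exclude = exclude.replace(".", "")
--     exclude += "«»"
--     for ch in exclude:
--         entity = entity.replace(ch, "_")
--     entity = entity.split("_")[0].strip()
--     return entity
-- ===== SOURCE B (Python) =====
-- import string
--
-- _EXCLUDE = frozenset(string.punctuation + "\u00ab\u00bb") - frozenset("-'.")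
--
-- def preprocess_entity(entity: str, lower=True):
--     if lower:
--         entity = entity.lower()
--     head = []
--     for c in entity:
--         if c in _EXCLUDE:
--             break
--         head.append(c)
--     return ''.join(head).strip()
-- ===== Notes on version B (the rewrite author's own statement) =====
-- stated objective: simpler
-- what changed: Instead of running one str.replace pass per excluded punctuation character (~31 full passes over the string) and then splitting on the underscore placeholder, B builds the exclude set once and makes a single left-to-right scan that stops at the first excluded character, then strips the prefix.
import Mathlib
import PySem

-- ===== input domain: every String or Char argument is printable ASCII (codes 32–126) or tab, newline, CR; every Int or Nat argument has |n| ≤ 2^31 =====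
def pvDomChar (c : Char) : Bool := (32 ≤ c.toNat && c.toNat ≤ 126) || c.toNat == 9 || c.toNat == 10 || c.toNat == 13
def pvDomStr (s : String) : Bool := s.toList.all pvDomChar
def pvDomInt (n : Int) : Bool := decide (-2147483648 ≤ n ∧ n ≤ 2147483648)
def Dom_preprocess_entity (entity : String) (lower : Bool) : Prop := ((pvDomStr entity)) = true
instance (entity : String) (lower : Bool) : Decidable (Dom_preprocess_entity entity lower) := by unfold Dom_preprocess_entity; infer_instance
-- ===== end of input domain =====

-- B replaces A's 31 per-character str.replace passes + split('_') by one left-to-right scan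
-- that stops at the first excluded character; objective: simpler (single pass).

-- ===== PORT A =====
-- string.punctuation (a stdlib constant)
def pvPunct : List Char := "!\"#$%&'()*+,-./:;<=>?@[\\]^_`{|}~".toList

def preprocess_entity (entity : String) (lower : Bool) : String :=
  let e := if lower then PySem.Chars.lower entity.toList else entity.toList
  let exclude := PySem.Chars.replace pvPunct ['-'] []
  let exclude := PySem.Chars.replace exclude ['\''] []
  let exclude := PySem.Chars.replace exclude ['.'] []
  let exclude := exclude ++ ['«', '»']
  let e := exclude.foldl (fun s ch => PySem.Chars.replace s [ch] ['_']) e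
  -- .split("_")[0]: the split result is always nonempty, so the [0] never raises
  String.mk (PySem.Chars.strip (PySem.List.pyGetD (PySem.Chars.splitOn e ['_']) 0 []))

-- ===== PORT B =====
-- the exclude set, built once: string.punctuation + "«»" minus "-'."
def pvExclude : List Char := "!\"#$%&()*+,/:;<=>?@[\\]^_`{|}~«»".toList

def preprocess_entity_alt (entity : String) (lower : Bool) : String :=
  let e := if lower then PySem.Chars.lower entity.toList else entity.toList
  -- for c in entity: if c in _EXCLUDE: break; head.append(c)  — a takeWhile
  String.mk (PySem.Chars.strip (e.takeWhile (fun c => !(pvExclude.contains c))))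

-- ===== PRECONDITION & SPEC =====
def Spec_preprocess_entity (entity : String) (lower : Bool) (out : String) : Prop := out = preprocess_entity_alt entity lower
instance (entity : String) (lower : Bool) (out : String) : Decidable (Spec_preprocess_entity entity lower out) := by unfold Spec_preprocess_entity; infer_instance

-- ===== CLAIM (what is proved, stated in full; the proofs are below) =====
def Claim_equal_preprocess_entity : Prop := ∀ (entity : String) (lower : Bool), Dom_preprocess_entity entity lower → Spec_preprocess_entity entity lower (preprocess_entity entity lower)

-- ===== LEMMAS AND PROOFS =====

-- str.replace with a single-character pattern is a character map
theorem pv_replace_go_single (c : Char) : ∀ (l : List Char) (fuel : Nat) (acc : List Char),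
    l.length ≤ fuel →
    PySem.Chars.replace.go [c] ['_'] fuel l acc
      = acc.reverse ++ l.map (fun x => if x = c then '_' else x) := by
  intro l
  induction l with
  | nil =>
    intro fuel acc _
    cases fuel <;> simp [PySem.Chars.replace.go]
  | cons a t ih =>
    intro fuel acc hle
    match fuel with
    | 0 => simp at hle
    | Nat.succ f =>
      have ht : t.length ≤ f := by simpa using hle
      by_cases h : a = c
      · subst h
        simp [PySem.Chars.replace.go, List.isPrefixOf, ih f ('_' :: acc) ht]
      · simp [PySem.Chars.replace.go, List.isPrefixOf, h, Ne.symm h, beq_iff_eq,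
              ih f (a :: acc) ht]

theorem pv_replace_single (c : Char) (s : List Char) :
    PySem.Chars.replace s [c] ['_'] = s.map (fun x => if x = c then '_' else x) := by
  simp [PySem.Chars.replace, pv_replace_go_single c s s.length [] (le_refl _)]

-- A's replace loop, as one map
theorem pv_fold_replace (ex : List Char) : ∀ (e : List Char),
    ex.foldl (fun s ch => PySem.Chars.replace s [ch] ['_']) e
      = e.map (fun c => if c ∈ ex then '_' else c) := by
  induction ex with
  | nil => intro e; simp
  | cons a rest ih =>
    intro e
    rw [List.foldl_cons, pv_replace_single, ih, List.map_map]
    refine List.map_congr_left ?_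
    intro c _
    by_cases hca : c = a
    · subst hca
      simp
    · simp [Function.comp, hca]

-- the accumulator of splitOn.go only prepends
theorem pv_splitOn_go_acc : ∀ (fuel : Nat) (l cur : List Char) (acc : List (List Char)),
    PySem.Chars.splitOn.go ['_'] fuel l cur acc
      = acc.reverse ++ PySem.Chars.splitOn.go ['_'] fuel l cur [] := by
  intro fuel
  induction fuel with
  | zero => intro l cur acc; simp [PySem.Chars.splitOn.go]
  | succ f ih =>
    intro l cur acc
    cases l with
    | nil => simp [PySem.Chars.splitOn.go]
    | cons c rest =>
      simp only [PySem.Chars.splitOn.go]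
      split
      · rw [ih _ _ (cur.reverse :: acc), ih _ _ [cur.reverse]]
        simp
      · exact ih _ _ acc

theorem pv_underscore_mem : '_' ∈ pvExclude := by decide

-- head of split('_') is the prefix before the first '_'
theorem pv_splitOn_go_head : ∀ (l : List Char) (fuel : Nat) (cur : List Char),
    l.length < fuel →
    (PySem.Chars.splitOn.go ['_'] fuel l cur []).head?
      = some (cur.reverse ++ l.takeWhile (· ≠ '_')) := by
  intro l
  induction l with
  | nil =>
    intro fuel cur h
    match fuel with
    | Nat.succ f => simp [PySem.Chars.splitOn.go]
  | cons c rest ih =>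
    intro fuel cur h
    match fuel with
    | Nat.succ f =>
      have hr : rest.length < f := by simpa using h
      by_cases hc : c = '_'
      · subst hc
        simp only [PySem.Chars.splitOn.go]
        rw [show (['_'].isPrefixOf ('_' :: rest)) = true by simp [List.isPrefixOf]]
        rw [pv_splitOn_go_acc]
        simp
      · simp only [PySem.Chars.splitOn.go]
        rw [show (['_'].isPrefixOf (c :: rest)) = false by
          simp [List.isPrefixOf]; exact fun hh => hc hh.symm]
        simp only [Bool.false_eq_true, if_neg, not_false_iff]
        rw [ih f (c :: cur) hr]
        simp [hc]

theorem pv_splitOn_head (s : List Char) :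
    PySem.List.pyGetD (PySem.Chars.splitOn s ['_']) 0 [] = s.takeWhile (· ≠ '_') := by
  have h := pv_splitOn_go_head s (s.length + 1) [] (by omega)
  unfold PySem.Chars.splitOn
  rw [PySem.List.pyGetD_zero]
  cases hgo : PySem.Chars.splitOn.go ['_'] (s.length + 1) s [] [] with
  | nil => rw [hgo] at h; simp at h
  | cons x xs =>
    rw [hgo] at h
    simp only [List.head?_cons, Option.some.injEq, List.reverse_nil, List.nil_append] at h
    simp [h]

-- mapping excluded chars to '_' then cutting at '_' = cutting at the first excluded char
theorem pv_takeWhile_map : ∀ (e : List Char),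
    ((e.map (fun c => if c ∈ pvExclude then '_' else c)).takeWhile (· ≠ '_'))
      = e.takeWhile (fun c => !(pvExclude.contains c)) := by
  intro e
  induction e with
  | nil => simp
  | cons a t ih =>
    by_cases ha : a ∈ pvExclude
    · simp [ha]
    · have hne : a ≠ '_' := fun hh => ha (hh ▸ pv_underscore_mem)
      simp [ha, hne]
      simpa using ih

-- A's exclude string evaluates to B's exclude set
theorem pv_exclude_eval :
    PySem.Chars.replace (PySem.Chars.replace (PySem.Chars.replace pvPunct ['-'] []) ['\''] []) ['.'] [] ++ ['«', '»'] = pvExclude := by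
  decide

-- ===== VERDICT (by name: the statement is the Claim_ definition above) =====
theorem preprocess_entity_spec : Claim_equal_preprocess_entity := by
  intro entity lower _
  unfold Spec_preprocess_entity preprocess_entity preprocess_entity_alt
  simp only [pv_exclude_eval, pv_fold_replace, pv_splitOn_head, pv_takeWhile_map]
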